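-- pv_equiv track=rewrite | github.com/StarsExpress/LeetCode-Repository | binary_search/sorting_cost.py | compute_sorting_cost
-- ===== SOURCE A (Python) =====
-- def _count_smaller(target: int, sorted_integers: list[int] | tuple[int]):
--     """Count number of integers smaller than target."""
--     if not sorted_integers:
--         return 0
--
--     back_idx, front_idx = 0, len(sorted_integers) - 1
--     while back_idx <= front_idx:
--         mid_idx = (back_idx + front_idx) // 2
--         if sorted_integers[mid_idx] < target:
--             back_idx = mid_idx + 1
--             continue
--         front_idx = mid_idx - 1
--
--     return back_idx  # Number of ints < target.
--
-- def compute_sorting_cost(numbers: list[int] | tuple[int]):  # LeetCode Q.1649.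
--     sorted_nums, hash_table = [], dict()
--     total_cost = 0
--     for number in numbers:  # Don't use pop due to slower speed.
--         if number not in hash_table.keys():
--             hash_table.update({number: 0})
--
--         smaller_count = _count_smaller(number, sorted_nums)
--         # Smaller or equal count: smaller count + past occurrence.
--         bigger_count = len(sorted_nums) - (smaller_count + hash_table[number])
--         total_cost += min(smaller_count, bigger_count)
--
--         sorted_nums.insert(smaller_count, number)  # Smaller count = insertion idx.
--         hash_table[number] += 1
--
--     return total_cost % (10 ** 9 + 7)
-- ===== SOURCE B (Python) =====
-- def compute_sorting_cost(numbers):  # LeetCode Q.1649.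
--     total_cost = 0
--     for i, number in enumerate(numbers):
--         smaller = equal = 0
--         for previous in numbers[:i]:
--             if previous < number:
--                 smaller += 1
--             elif previous == number:
--                 equal += 1
--         total_cost += min(smaller, i - smaller - equal)
--     return total_cost % (10 ** 9 + 7)
-- ===== Notes on version B (the rewrite author's own statement) =====
-- stated objective: simpler
-- what changed: B drops A's incrementally maintained sorted list, hand-written binary search and occurrence dict, and instead counts each element's smaller/equal predecessors with one direct scan of the prefix.
import Mathlib
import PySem

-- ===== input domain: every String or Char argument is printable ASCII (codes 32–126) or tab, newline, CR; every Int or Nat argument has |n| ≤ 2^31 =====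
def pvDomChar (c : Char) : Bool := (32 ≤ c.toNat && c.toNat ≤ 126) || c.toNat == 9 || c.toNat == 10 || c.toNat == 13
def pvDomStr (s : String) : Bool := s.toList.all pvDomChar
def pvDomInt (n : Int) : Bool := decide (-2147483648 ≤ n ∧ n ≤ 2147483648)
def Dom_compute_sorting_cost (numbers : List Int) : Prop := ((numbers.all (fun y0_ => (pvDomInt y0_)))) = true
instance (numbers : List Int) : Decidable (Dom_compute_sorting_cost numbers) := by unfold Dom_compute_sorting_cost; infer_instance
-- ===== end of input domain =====

-- B replaces A's incrementally maintained sorted list + binary search + occurrence dict by a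
-- direct scan of each element's prefix (simpler; same asymptotic cost).

-- ===== PORT A =====
-- the while-loop of _count_smaller; sorted_integers[mid_idx] is always in range when the loop
-- is reached with 0 ≤ back ≤ front < len, so pyGetD … 0 is exact there
def countSmallerLoop (target : Int) (xs : List Int) (back front : Int) : Int :=
  if _h : back ≤ front then
    let mid := PySem.Int.floordiv (back + front) 2
    if PySem.List.pyGetD xs mid 0 < target then
      countSmallerLoop target xs (mid + 1) front
    else
      countSmallerLoop target xs back (mid - 1)
  else back
termination_by (front + 1 - back).toNat
decreasing_by
  · have := PySem.Int.floordiv_two_mid_bounds _h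
    omega
  · have := PySem.Int.floordiv_two_mid_bounds _h
    omega

def _count_smaller (target : Int) (sorted_integers : List Int) : Int :=
  if sorted_integers = [] then 0
  else countSmallerLoop target sorted_integers 0 ((sorted_integers.length : Int) - 1)

-- the body of A's for-loop; state = (sorted_nums, hash_table, total_cost).
-- hash_table[number] is read only after number is guaranteed a key, so getD … 0 is exact.
def aStep (st : List Int × PySem.Dict Int Int × Int) (number : Int) :
    List Int × PySem.Dict Int Int × Int :=
  let sorted_nums := st.1
  let hash_table := st.2.1
  let total_cost := st.2.2
  let hash_table := if hash_table.contains number then hash_table else hash_table.insert number 0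
  let smaller_count := _count_smaller number sorted_nums
  let bigger_count := (sorted_nums.length : Int) - (smaller_count + hash_table.getD number 0)
  let total_cost := total_cost + min smaller_count bigger_count
  let sorted_nums := PySem.List.insert sorted_nums smaller_count number
  let hash_table := hash_table.insert number (hash_table.getD number 0 + 1)
  (sorted_nums, hash_table, total_cost)

def compute_sorting_cost (numbers : List Int) : Int :=
  let st := numbers.foldl aStep ([], PySem.Dict.empty, 0)
  PySem.Int.mod st.2.2 (10 ^ 9 + 7)

-- ===== PORT B =====
-- inner loop of B: count smaller / equal predecessors in one scan
def bCounts (number : Int) (prefix_ : List Int) : Int × Int :=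
  prefix_.foldl
    (fun (c : Int × Int) previous =>
      if previous < number then (c.1 + 1, c.2)
      else if previous = number then (c.1, c.2 + 1)
      else c) (0, 0)

def compute_sorting_cost_alt (numbers : List Int) : Int :=
  let total_cost := (PySem.List.enumerate numbers 0).foldl
    (fun total_cost p =>
      let i := p.1
      let number := p.2
      let c := bCounts number (PySem.List.slice numbers none (some i))
      total_cost + min c.1 (i - c.1 - c.2)) 0
  PySem.Int.mod total_cost (10 ^ 9 + 7)

-- ===== PRECONDITION & SPEC =====
def Spec_compute_sorting_cost (numbers : List Int) (out : Int) : Prop := out = compute_sorting_cost_alt numbers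
instance (numbers : List Int) (out : Int) : Decidable (Spec_compute_sorting_cost numbers out) := by unfold Spec_compute_sorting_cost; infer_instance

-- ===== CLAIM (what is proved, stated in full; the proofs are below) =====
def Claim_equal_compute_sorting_cost : Prop := ∀ (numbers : List Int), Dom_compute_sorting_cost numbers → Spec_compute_sorting_cost numbers (compute_sorting_cost numbers)

-- ===== LEMMAS AND PROOFS =====

-- the per-element cost both programs accumulate, over the element's prefix
def gCost (pre : List Int) (x : Int) : Int :=
  min ((pre.countP (· < x) : Int))
      ((pre.length : Int) - (pre.countP (· < x) : Int) - (pre.count x : Int))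

-- the common total cost
def costAux : List Int → List Int → Int
  | _, [] => 0
  | pre, x :: rest => gCost pre x + costAux (pre ++ [x]) rest

-- ---- B side ----

lemma bCounts_acc (n : Int) (l : List Int) (a b : Int) :
    l.foldl (fun (c : Int × Int) previous =>
      if previous < n then (c.1 + 1, c.2)
      else if previous = n then (c.1, c.2 + 1)
      else c) (a, b) = (a + (l.countP (· < n) : Int), b + (l.count n : Int)) := by
  induction l generalizing a b with
  | nil => simp
  | cons x t ih =>
    by_cases h1 : x < n
    · have hne : ¬ (x == n) = true := by simp; omega
      simp [h1, ih, List.count_cons, hne]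
      ring
    · by_cases h2 : x = n
      · subst h2
        simp [ih]
        ring
      · simp [h1, h2, ih]

lemma bCounts_eq (n : Int) (l : List Int) :
    bCounts n l = ((l.countP (· < n) : Int), (l.count n : Int)) := by
  simp [bCounts, bCounts_acc]

lemma bLoop_eq (rest : List Int) : ∀ (pre : List Int) (acc : Int),
    ((PySem.List.enumerate rest (pre.length : Int)).foldl
      (fun total_cost p =>
        let i := p.1
        let number := p.2
        let c := bCounts number (PySem.List.slice (pre ++ rest) none (some i))
        total_cost + min c.1 (i - c.1 - c.2)) acc) = acc + costAux pre rest := by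
  induction rest with
  | nil => simp [costAux, PySem.List.enumerate_nil]
  | cons x t ih =>
    intro pre acc
    rw [PySem.List.enumerate_cons]
    simp only [List.foldl_cons]
    have hsl : PySem.List.slice (pre ++ x :: t) none (some (pre.length : Int)) = pre := by
      rw [PySem.List.slice_to_natCast]; exact List.take_left
    rw [hsl, bCounts_eq]
    have hl : pre ++ x :: t = (pre ++ [x]) ++ t := by simp
    rw [hl]
    have h2 : ((pre.length : Int) + 1) = (((pre ++ [x]).length : Int)) := by simp
    rw [h2, ih (pre ++ [x])]
    simp only [costAux, gCost]
    ring

-- ---- A side: the sorted-list characterisation and the binary search ----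

lemma sorted_index_iff (t : Int) : ∀ (l : List Int), l.Pairwise (· ≤ ·) →
    ∀ (i : Nat) (hi : i < l.length), (l[i] < t ↔ i < l.countP (· < t)) := by
  intro l hs
  induction l with
  | nil => intro i hi; simp at hi
  | cons y ys ih =>
    rw [List.pairwise_cons] at hs
    intro i hi
    by_cases hy : y < t
    · have hc : (y :: ys).countP (· < t) = ys.countP (· < t) + 1 := by
        simp [hy]
      cases i with
      | zero => simp [hy, hc]
      | succ j =>
        simp only [List.getElem_cons_succ, hc]
        have := ih hs.2 j (by simpa using hi)
        omega
    · have hz : ys.countP (· < t) = 0 := by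
        rw [List.countP_eq_zero]
        intro z hz
        simp only [decide_eq_true_eq]
        have := hs.1 z hz
        omega
      have hc : (y :: ys).countP (· < t) = 0 := by
        simp [hy, hz]
      rw [hc]
      cases i with
      | zero => simpa using hy
      | succ j =>
        simp only [List.getElem_cons_succ]
        constructor
        · intro h
          exfalso
          have hj : j < ys.length := by simpa using hi
          have hmem : ys[j] ∈ ys := List.getElem_mem hj
          have := hs.1 _ hmem
          omega
        · omega

lemma sorted_take_lt (l : List Int) (t : Int) (hs : l.Pairwise (· ≤ ·)) :
    ∀ y ∈ l.take (l.countP (· < t)), y < t := by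
  intro y hy
  obtain ⟨i, hi, rfl⟩ := List.mem_iff_getElem.mp hy
  rw [List.getElem_take]
  have hi' : i < l.countP (· < t) := by simp at hi; omega
  exact (sorted_index_iff t l hs i (by have := List.countP_le_length (l := l) (p := (· < t)); simp at hi; omega)).mpr hi'

lemma sorted_drop_ge (l : List Int) (t : Int) (hs : l.Pairwise (· ≤ ·)) :
    ∀ y ∈ l.drop (l.countP (· < t)), t ≤ y := by
  intro y hy
  obtain ⟨i, hi, rfl⟩ := List.mem_iff_getElem.mp hy
  rw [List.getElem_drop]
  have hlen : (l.drop (l.countP (· < t))).length = l.length - l.countP (· < t) := by simp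
  have h1 : l.countP (· < t) + i < l.length := by omega
  have := (sorted_index_iff t l hs (l.countP (· < t) + i) h1)
  omega

lemma countSmallerLoop_eq (t : Int) (l : List Int) (hs : l.Pairwise (· ≤ ·)) :
    ∀ (back front : Int), 0 ≤ back → back ≤ (l.countP (· < t) : Int) →
      front < (l.length : Int) → (l.countP (· < t) : Int) ≤ front + 1 → back ≤ front + 1 →
      countSmallerLoop t l back front = (l.countP (· < t) : Int) := by
  intro back front
  induction back, front using countSmallerLoop.induct t l with
  | case1 back front h mid hlt ih =>
    intro h0 h1 h2 h3 h4
    have hmid := PySem.Int.floordiv_two_mid_bounds h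
    rw [countSmallerLoop, dif_pos h]
    simp only [] 
    rw [if_pos hlt]
    have hmr : 0 ≤ mid ∧ mid < (l.length : Int) := by simp only [mid]; omega
    rw [PySem.List.pyGetD_eq_getElem l 0 hmr.1 hmr.2] at hlt
    have hidx := (sorted_index_iff t l hs mid.toNat (by omega)).mp hlt
    apply ih <;> simp only [mid] at * <;> omega
  | case2 back front h mid hlt ih =>
    intro h0 h1 h2 h3 h4
    have hmid := PySem.Int.floordiv_two_mid_bounds h
    rw [countSmallerLoop, dif_pos h]
    simp only []
    rw [if_neg hlt]
    have hmr : 0 ≤ mid ∧ mid < (l.length : Int) := by simp only [mid]; omega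
    rw [PySem.List.pyGetD_eq_getElem l 0 hmr.1 hmr.2] at hlt
    have hidx : ¬ (mid.toNat < l.countP (· < t)) :=
      fun hc => hlt ((sorted_index_iff t l hs mid.toNat (by omega)).mpr hc)
    apply ih <;> simp only [mid] at * <;> omega
  | case3 back front h =>
    intro h0 h1 h2 h3 h4
    rw [countSmallerLoop, dif_neg h]
    omega

lemma count_smaller_eq (t : Int) (l : List Int) (hs : l.Pairwise (· ≤ ·)) :
    _count_smaller t l = (l.countP (· < t) : Int) := by
  unfold _count_smaller
  by_cases h : l = []
  · simp [h]
  · rw [if_neg h]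
    have hlen : 1 ≤ l.length := List.length_pos_iff.mpr h
    have hk : l.countP (· < t) ≤ l.length := List.countP_le_length
    exact countSmallerLoop_eq t l hs 0 ((l.length : Int) - 1) (by omega) (by omega)
      (by omega) (by omega) (by omega)

-- ---- A side: the main loop invariant ----

lemma aLoop_eq (rest : List Int) : ∀ (pre srt : List Int) (d : PySem.Dict Int Int) (acc : Int),
    srt.Pairwise (· ≤ ·) → srt.Perm pre →
    (∀ v, d.getD v 0 = (pre.count v : Int)) →
    (∀ v, d.contains v = true ↔ v ∈ pre) →
    (rest.foldl aStep (srt, d, acc)).2.2 = acc + costAux pre rest := by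
  induction rest with
  | nil => intro pre srt d acc _ _ _ _; simp [costAux]
  | cons x t ih =>
    intro pre srt d acc hs hp hd1 hd2
    rw [List.foldl_cons]
    -- names for the pieces of one step
    set k : Nat := srt.countP (· < x) with hk
    have hkp : pre.countP (· < x) = k := (hp.countP_eq _).symm
    have hlen : srt.length = pre.length := hp.length_eq
    have hkle : k ≤ srt.length := List.countP_le_length
    -- the dict after the membership branch
    set d1 := if d.contains x then d else d.insert x 0 with hd1def
    have hd1x : d1.getD x 0 = (pre.count x : Int) := by
      by_cases hc : d.contains x
      · simp [hd1def, hc, hd1 x]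
      · have hx : x ∉ pre := fun hm => by simp [(hd2 x).mpr hm] at hc
        have : pre.count x = 0 := List.count_eq_zero.mpr hx
        simp [hd1def, hc, PySem.Dict.getD_insert_self, this]
    have hd1v : ∀ v, d1.getD v 0 = (pre.count v : Int) := by
      intro v
      by_cases hv : v = x
      · subst hv; exact hd1x
      · by_cases hc : d.contains x
        · simp [hd1def, hc, hd1 v]
        · simp [hd1def, hc, PySem.Dict.getD_insert_of_ne _ _ _ hv, hd1 v]
    -- the smaller count
    have hsm : _count_smaller x srt = (k : Int) := count_smaller_eq x srt hs
    -- the new sorted list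
    have hins : PySem.List.insert srt (_count_smaller x srt) x = srt.take k ++ x :: srt.drop k := by
      rw [hsm]; exact PySem.List.insert_natCast srt k x hkle
    have h1 : (srt.take k ++ x :: srt.drop k).Perm (x :: srt) := by
      have h := List.perm_middle (a := x) (l₁ := srt.take k) (l₂ := srt.drop k)
      rwa [List.take_append_drop] at h
    have hperm : (srt.take k ++ x :: srt.drop k).Perm (pre ++ [x]) :=
      h1.trans ((hp.cons x).trans (List.perm_append_singleton x pre).symm)
    have hsort' : (srt.take k ++ x :: srt.drop k).Pairwise (· ≤ ·) := by
      rw [List.pairwise_append]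
      refine ⟨hs.sublist (List.take_sublist ..), ?_, ?_⟩
      · rw [List.pairwise_cons]
        exact ⟨fun b hb => sorted_drop_ge srt x hs b hb, hs.sublist (List.drop_sublist ..)⟩
      · intro a ha b hb
        have hax : a < x := sorted_take_lt srt x hs a ha
        rcases List.mem_cons.mp hb with rfl | hb'
        · omega
        · have := sorted_drop_ge srt x hs b hb'; omega
    set d2 := d1.insert x (d1.getD x 0 + 1) with hd2def
    have hd2v : ∀ v, d2.getD v 0 = ((pre ++ [x]).count v : Int) := by
      intro v
      by_cases hv : v = x
      · subst hv
        simp [hd2def, PySem.Dict.getD_insert_self, hd1x, List.count_append]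
      · simp [hd2def, PySem.Dict.getD_insert_of_ne _ _ _ hv, hd1v v, List.count_append,
          List.count_singleton]
        omega
    have hc2v : ∀ v, d2.contains v = true ↔ v ∈ pre ++ [x] := by
      intro v
      rw [hd2def, PySem.Dict.contains_insert]
      by_cases hc : d.contains x
      · simp [hd1def, hc, hd2 v, List.mem_append]
        tauto
      · simp [hd1def, hc, PySem.Dict.contains_insert, hd2 v, List.mem_append]
        tauto
    have hmin : min (_count_smaller x srt)
        ((srt.length : Int) - (_count_smaller x srt + d1.getD x 0)) = gCost pre x := by
      rw [hsm, hd1x, hlen, gCost, hkp]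
      omega
    have haStep : aStep (srt, d, acc) x
        = (srt.take k ++ x :: srt.drop k, d2, acc + gCost pre x) := by
      simp only [aStep]
      rw [hins, hmin, hd2def, hd1def]
    rw [haStep, ih (pre ++ [x]) _ _ _ hsort' hperm hd2v hc2v]
    simp only [costAux]
    ring

-- ===== VERDICT (by name: the statement is the Claim_ definition above) =====
theorem compute_sorting_cost_spec : Claim_equal_compute_sorting_cost := by
  intro numbers _
  unfold Spec_compute_sorting_cost compute_sorting_cost compute_sorting_cost_alt
  have hA := aLoop_eq numbers [] [] PySem.Dict.empty 0 (by simp) (by simp)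
      (by intro v; simp [PySem.Dict.getD_empty]) (by intro v; simp [PySem.Dict.contains_empty])
  have hB := bLoop_eq numbers [] 0
  simp only [List.nil_append, List.length_nil, Nat.cast_zero] at hA hB
  dsimp only
  rw [hA, hB]
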